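-- pv_equiv track=rewrite | github.com/zhaokai2014/IsoCon_Eval | analysis/ampliconic/get_distinct_isoforms_ampl.py | read_fasta_modify_header
-- ===== SOURCE A (Python) =====
-- def read_fasta_modify_header(fasta_file):
--     fasta_seqs = {}
--     k = 0
--     temp = ''
--     accession = ''
--     for line in fasta_file:
--         if line[0] == '>' and k == 0:
--             accession = line[1:].strip().split()[0]
--             accession = accession.replace("(","")
--             accession = accession.replace(")","")
--             accession = accession.replace(",","")
--             accession = accession.replace("|","_")
--
--             fasta_seqs[accession] = ''
--             k += 1
--         elif line[0] == '>':
--             yield accession, temp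
--             temp = ''
--             accession = line[1:].strip().split()[0]
--             accession = accession.replace("(","")
--             accession = accession.replace(")","")
--             accession = accession.replace(",","")
--             accession = accession.replace("|","_")
--         else:
--             temp += line.strip()
--     yield accession, temp
-- ===== SOURCE B (Python) =====
-- def _clean(header):
--     acc = header[1:].strip().split()[0]
--     return acc.replace("(", "").replace(")", "").replace(",", "").replace("|", "_")
--
--
-- def read_fasta_modify_header(fasta_file):
--     lines = list(fasta_file)
--     # phase 1: group the lines into maximal runs of header / non-header lines
--     runs = []
--     i, n = 0, len(lines)
--     while i < n:
--         is_header = lines[i][0] == '>'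
--         j = i
--         while j < n and (lines[j][0] == '>') == is_header:
--             j += 1
--         runs.append((is_header, lines[i:j]))
--         i = j
--     # phase 2: emit one record per header, flushing the collected parts
--     accession, parts, seen = '', [], False
--     for is_header, run in runs:
--         if is_header:
--             for line in run:
--                 if seen:
--                     yield accession, ''.join(parts)
--                     parts = []
--                 accession = _clean(line)
--                 seen = True
--         else:
--             parts.extend(line.strip() for line in run)
--     yield accession, ''.join(parts)
-- ===== Notes on version B (the rewrite author's own statement) =====
-- stated objective: alternative
-- what changed: Replaces A's per-line state machine (k counter, growing temp string, unused dict) with a two-phase parser that first groups the lines into maximal header/non-header runs and then emits records from the runs, collecting sequence parts in a list joined once per record; Pre_ excludes only inputs where A raises IndexError (an empty-string line, or a header whose tail is all whitespace).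
import Mathlib
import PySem

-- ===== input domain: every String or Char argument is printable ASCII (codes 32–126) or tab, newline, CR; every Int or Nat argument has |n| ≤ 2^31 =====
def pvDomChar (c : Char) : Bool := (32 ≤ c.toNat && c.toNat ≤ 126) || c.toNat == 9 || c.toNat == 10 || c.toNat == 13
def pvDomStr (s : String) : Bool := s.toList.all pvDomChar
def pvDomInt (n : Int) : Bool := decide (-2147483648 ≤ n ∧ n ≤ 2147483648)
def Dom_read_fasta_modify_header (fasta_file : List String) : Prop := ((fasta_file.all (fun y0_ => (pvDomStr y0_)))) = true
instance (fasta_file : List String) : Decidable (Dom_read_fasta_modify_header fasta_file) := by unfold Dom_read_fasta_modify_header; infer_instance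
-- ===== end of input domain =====

-- B is a two-phase parser (group lines into header/non-header runs, then emit records,
-- joining a parts list per record) replacing A's per-line k/temp/dict state machine
-- (objective: alternative, same cost). Both are generators in Python; ports return the
-- list of yielded pairs.


-- line[0] == '>'  (empty line ⇒ IndexError in Python; excluded by Pre_, the port treats none ≠ some '>')
def pvIsHeader (line : String) : Bool := PySem.Str.pyGet? line 0 == some '>'

-- line[1:].strip().split()[0] + the four replaces; split()[0] raises on an all-whitespace
-- header tail (excluded by Pre_), the port reads index 0 with default "".
def pvClean (line : String) : String :=
  let acc := PySem.List.pyGetD (PySem.Str.split₀ (PySem.Str.strip (PySem.Str.slice line (some 1) none))) 0 ""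
  PySem.Str.replace (PySem.Str.replace (PySem.Str.replace (PySem.Str.replace acc "(" "") ")" "") "," "") "|" "_"

-- ===== PORT A =====
structure pvStA where
  seqs : PySem.Dict String String
  k : Int
  temp : String
  accession : String
  out : List (String × String)

def pvStepA (st : pvStA) (line : String) : pvStA :=
  if pvIsHeader line && st.k == 0 then
    let accession := pvClean line
    { st with seqs := st.seqs.insert accession "", k := st.k + 1, accession := accession }
  else if pvIsHeader line then
    { st with out := st.out ++ [(st.accession, st.temp)], temp := "", accession := pvClean line }
  else
    { st with temp := st.temp ++ PySem.Str.strip line }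

def read_fasta_modify_header (fasta_file : List String) : List (String × String) :=
  let fin := fasta_file.foldl pvStepA ⟨PySem.Dict.empty, 0, "", "", []⟩
  fin.out ++ [(fin.accession, fin.temp)]

-- ===== PORT B =====
-- phase 1 of Source B: group into maximal runs of header / non-header lines
def pvRuns : List String → List (Bool × List String)
  | [] => []
  | l :: ls =>
      let k := pvIsHeader l
      (k, l :: ls.takeWhile (fun x => pvIsHeader x == k)) ::
        pvRuns (ls.dropWhile (fun x => pvIsHeader x == k))
termination_by ls => ls.length
decreasing_by
  have := List.length_dropWhile_le (fun x => pvIsHeader x == k) ls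
  simpa using Nat.lt_succ_of_le this

-- ''.join(parts)
def pvJoin : List String → String
  | [] => ""
  | s :: ss => s ++ pvJoin ss

structure pvStB where
  accession : String
  parts : List String
  seen : Bool
  out : List (String × String)

-- body of `for line in run` in the header branch of Source B
def pvHeaderLine (st : pvStB) (line : String) : pvStB :=
  let st :=
    if st.seen then
      { st with out := st.out ++ [(st.accession, pvJoin st.parts)], parts := [] }
    else st
  { st with accession := pvClean line, seen := true }

-- phase 2 of Source B: one step per run
def pvRunStep (st : pvStB) (g : Bool × List String) : pvStB :=
  if g.1 then g.2.foldl pvHeaderLine st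
  else { st with parts := st.parts ++ g.2.map PySem.Str.strip }

def read_fasta_modify_header_alt (fasta_file : List String) : List (String × String) :=
  let fin := (pvRuns fasta_file).foldl pvRunStep ⟨"", [], false, []⟩
  fin.out ++ [(fin.accession, pvJoin fin.parts)]

-- ===== PRECONDITION & SPEC =====
-- Pre_ excludes exactly the inputs where Python A raises: an empty-string line (IndexError on
-- line[0]) or a header line whose tail line[1:] is all whitespace (IndexError on split()[0]).
-- B raises the same IndexError there.
def Pre_read_fasta_modify_header (fasta_file : List String) : Prop :=
  ∀ line ∈ fasta_file, line ≠ "" ∧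
    (line.toList.head? = some '>' →
      ((line.toList.drop 1).any (fun c => !PySem.Chars.isspace c)) = true)

instance (fasta_file : List String) : Decidable (Pre_read_fasta_modify_header fasta_file) := by
  unfold Pre_read_fasta_modify_header; infer_instance

def pvWitness_read_fasta_modify_header : List String :=
  [">acc1|x (v), y", "ACGT", "GG TT", ">b", ">c d", "AA"]

def Spec_read_fasta_modify_header (fasta_file : List String) (out : List (String × String)) : Prop := out = read_fasta_modify_header_alt fasta_file
instance (fasta_file : List String) (out : List (String × String)) : Decidable (Spec_read_fasta_modify_header fasta_file out) := by unfold Spec_read_fasta_modify_header; infer_instance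

-- ===== CLAIM (what is proved, stated in full; the proofs are below) =====
def Claim_equal_read_fasta_modify_header : Prop := ∀ (fasta_file : List String), Dom_read_fasta_modify_header fasta_file → Pre_read_fasta_modify_header fasta_file → Spec_read_fasta_modify_header fasta_file (read_fasta_modify_header fasta_file)

-- ===== LEMMAS AND PROOFS =====

-- a per-line step equivalent to processing B's runs line by line
def pvStepB (st : pvStB) (line : String) : pvStB :=
  if pvIsHeader line then pvHeaderLine st line
  else { st with parts := st.parts ++ [PySem.Str.strip line] }

lemma pvJoin_append (xs : List String) (s : String) :
    pvJoin (xs ++ [s]) = pvJoin xs ++ s := by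
  induction xs with
  | nil => simp [pvJoin]
  | cons x xs ih => simp [pvJoin, ih, String.append_assoc]

-- a non-header run folds as parts-extension
lemma pvFold_nonheader (run : List String) (st : pvStB)
    (h : ∀ l ∈ run, pvIsHeader l = false) :
    run.foldl pvStepB st = { st with parts := st.parts ++ run.map PySem.Str.strip } := by
  induction run generalizing st with
  | nil => simp
  | cons l ls ih =>
    have hl := h l (by simp)
    rw [List.foldl_cons]
    rw [show pvStepB st l = { st with parts := st.parts ++ [PySem.Str.strip l] } by
      simp [pvStepB, hl]]
    rw [ih _ (fun x hx => h x (by simp [hx]))]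
    simp

-- a header run folds with pvHeaderLine = pvStepB
lemma pvFold_header (run : List String) (st : pvStB)
    (h : ∀ l ∈ run, pvIsHeader l = true) :
    run.foldl pvHeaderLine st = run.foldl pvStepB st := by
  induction run generalizing st with
  | nil => simp
  | cons l ls ih =>
    have hl := h l (by simp)
    have hstep : pvStepB st l = pvHeaderLine st l := by simp [pvStepB, hl]
    rw [List.foldl_cons, List.foldl_cons, hstep]
    exact ih _ (fun x hx => h x (by simp [hx]))

-- folding B's runs equals folding per line
lemma pvRuns_fold_aux (n : Nat) : ∀ (lines : List String), lines.length ≤ n →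
    ∀ (st : pvStB), (pvRuns lines).foldl pvRunStep st = lines.foldl pvStepB st := by
  induction n with
  | zero =>
    intro lines hlen st
    have : lines = [] := List.eq_nil_of_length_eq_zero (Nat.le_zero.mp hlen)
    subst this; rw [pvRuns]; simp
  | succ n ih =>
    intro lines hlen st
    match lines with
    | [] => rw [pvRuns]; simp
    | l :: ls =>
      rw [pvRuns, List.foldl_cons]
      have hrest : (ls.dropWhile (fun x => pvIsHeader x == pvIsHeader l)).length ≤ n := by
        have := List.length_dropWhile_le (fun x => pvIsHeader x == pvIsHeader l) ls
        simp at hlen; omega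
      rw [ih _ hrest]
      have hsplit : l :: ls =
          (l :: ls.takeWhile (fun x => pvIsHeader x == pvIsHeader l)) ++
            ls.dropWhile (fun x => pvIsHeader x == pvIsHeader l) := by
        simp [List.takeWhile_append_dropWhile]
      conv_rhs => rw [hsplit]
      rw [List.foldl_append]
      congr 1
      have hmem : ∀ x ∈ l :: ls.takeWhile (fun x => pvIsHeader x == pvIsHeader l),
          pvIsHeader x = pvIsHeader l := by
        intro x hx
        rcases List.mem_cons.mp hx with rfl | hx
        · rfl
        · simpa using List.mem_takeWhile_imp hx
      cases hk : pvIsHeader l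
      · show pvRunStep st (false, l :: ls.takeWhile (fun x => pvIsHeader x == false)) = _
        rw [show pvRunStep st (false, l :: ls.takeWhile (fun x => pvIsHeader x == false)) = { st with parts := st.parts ++ (l :: ls.takeWhile (fun x => pvIsHeader x == false)).map PySem.Str.strip } from rfl]
        rw [pvFold_nonheader]
        intro x hx
        rw [hk] at hmem
        exact hmem x hx
      · show pvRunStep st (true, l :: ls.takeWhile (fun x => pvIsHeader x == true)) = _
        rw [show pvRunStep st (true, l :: ls.takeWhile (fun x => pvIsHeader x == true)) = (l :: ls.takeWhile (fun x => pvIsHeader x == true)).foldl pvHeaderLine st from rfl]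
        apply pvFold_header
        intro x hx
        rw [hk] at hmem
        exact hmem x hx

lemma pvRuns_fold (lines : List String) (st : pvStB) :
    (pvRuns lines).foldl pvRunStep st = lines.foldl pvStepB st :=
  pvRuns_fold_aux lines.length lines (Nat.le_refl _) st

def pvFinA (st : pvStA) : List (String × String) := st.out ++ [(st.accession, st.temp)]
def pvFinB (st : pvStB) : List (String × String) := st.out ++ [(st.accession, pvJoin st.parts)]

-- the invariant relating A's and B's per-line machines
lemma pvMain (lines : List String) (stA : pvStA) (stB : pvStB)
    (hout : stA.out = stB.out) (hacc : stA.accession = stB.accession)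
    (htemp : stA.temp = pvJoin stB.parts) (hk : (stA.k == 0) = !stB.seen) :
    pvFinA (lines.foldl pvStepA stA) = pvFinB (lines.foldl pvStepB stB) := by
  induction lines generalizing stA stB with
  | nil => simp [pvFinA, pvFinB, hout, hacc, htemp]
  | cons l ls ih =>
    rw [List.foldl_cons, List.foldl_cons]
    by_cases hh : pvIsHeader l = true
    · cases hseen : stB.seen
      · have hk0 : (stA.k == 0) = true := by rw [hk, hseen]; rfl
        have hA : pvStepA stA l = { stA with seqs := stA.seqs.insert (pvClean l) "", k := stA.k + 1, accession := pvClean l } := by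
          simp [pvStepA, hh, hk0]
        have hB : pvStepB stB l = { stB with accession := pvClean l, seen := true } := by
          simp [pvStepB, pvHeaderLine, hh, hseen]
        rw [hA, hB]
        apply ih <;> simp [hout, htemp]
        have : stA.k = 0 := by simpa using hk0
        simp [this]
      · have hk0 : (stA.k == 0) = false := by rw [hk, hseen]; rfl
        have hA : pvStepA stA l = { stA with out := stA.out ++ [(stA.accession, stA.temp)], temp := "", accession := pvClean l } := by
          simp [pvStepA, hh, hk0]
        have hB : pvStepB stB l = { stB with accession := pvClean l, seen := true, out := stB.out ++ [(stB.accession, pvJoin stB.parts)], parts := [] } := by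
          simp [pvStepB, pvHeaderLine, hh, hseen]
        rw [hA, hB]
        apply ih <;> simp [hout, hacc, htemp, pvJoin, hk0]
    · have hh' : pvIsHeader l = false := by simpa using hh
      have hA : pvStepA stA l = { stA with temp := stA.temp ++ PySem.Str.strip l } := by
        simp [pvStepA, hh']
      have hB : pvStepB stB l = { stB with parts := stB.parts ++ [PySem.Str.strip l] } := by
        simp [pvStepB, hh']
      rw [hA, hB]
      apply ih <;> simp [hout, hacc, htemp, hk, pvJoin_append]

-- ===== VERDICT (by name: the statement is the Claim_ definition above) =====
theorem read_fasta_modify_header_spec : Claim_equal_read_fasta_modify_header := by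
  intro fasta_file _ _
  unfold Spec_read_fasta_modify_header read_fasta_modify_header read_fasta_modify_header_alt
  rw [pvRuns_fold]
  exact pvMain fasta_file ⟨PySem.Dict.empty, 0, "", "", []⟩ ⟨"", [], false, []⟩ rfl rfl rfl rfl
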